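-- pv_equiv track=rewrite | github.com/roccowkh/TakeHomeApr | theater_booking.py | find_seats_from_middle
-- ===== SOURCE A (Python) =====
-- def find_seats_from_middle(seating_map, current_row, num_tickets):
--     """Find seats by filling from middle outwards"""
--     seats_per_row = len(seating_map[0])
--     middle = (seats_per_row - 1) // 2
--     seats = []
--
--     # Fill right side first
--     col = middle
--     while col < seats_per_row and len(seats) < num_tickets:
--         if seating_map[current_row][col] is None:
--             seats.append((current_row, col))
--         col += 1
--
--     # Then fill left side if needed
--     col = middle - 1
--     while col >= 0 and len(seats) < num_tickets:
--         if seating_map[current_row][col] is None: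
--             seats.append((current_row, col))
--         col -= 1
--
--     return seats
-- ===== SOURCE B (Python) =====
-- def find_seats_from_middle(seating_map, current_row, num_tickets):
--     """Find seats by key-sorting the column indices into middle-out order,
--     then one filtering pass and a truncation."""
--     row = seating_map[current_row]
--     seats_per_row = len(seating_map[0])
--     middle = (seats_per_row - 1) // 2
--
--     def key(c):
--         return c - middle if c >= middle else seats_per_row + middle - c
--
--     order = sorted(range(seats_per_row), key=key)
--     available = [(current_row, c) for c in order if row[c] is None]
--     return available[:max(num_tickets, 0)]
-- ===== Notes on version B (the rewrite author's own statement) =====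
-- stated objective: alternative
-- what changed: Replaces A's two directional early-stopping while-loops by key-sorting the column indices into middle-out order (sorted(range(n), key=...)), then a single filtering pass over that order and a truncation to max(num_tickets,0).
-- outside the precondition, e.g. on find_seats_from_middle([[None, None, None], [None, None]], 1, 1): A returns [(1, 1)], B raises IndexError; on find_seats_from_middle([[], [None]], 1, 1): A returns [(1, -1)], B returns []; on find_seats_from_middle([[], []], 0, 1): A raises IndexError, B returns []
import Mathlib
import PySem

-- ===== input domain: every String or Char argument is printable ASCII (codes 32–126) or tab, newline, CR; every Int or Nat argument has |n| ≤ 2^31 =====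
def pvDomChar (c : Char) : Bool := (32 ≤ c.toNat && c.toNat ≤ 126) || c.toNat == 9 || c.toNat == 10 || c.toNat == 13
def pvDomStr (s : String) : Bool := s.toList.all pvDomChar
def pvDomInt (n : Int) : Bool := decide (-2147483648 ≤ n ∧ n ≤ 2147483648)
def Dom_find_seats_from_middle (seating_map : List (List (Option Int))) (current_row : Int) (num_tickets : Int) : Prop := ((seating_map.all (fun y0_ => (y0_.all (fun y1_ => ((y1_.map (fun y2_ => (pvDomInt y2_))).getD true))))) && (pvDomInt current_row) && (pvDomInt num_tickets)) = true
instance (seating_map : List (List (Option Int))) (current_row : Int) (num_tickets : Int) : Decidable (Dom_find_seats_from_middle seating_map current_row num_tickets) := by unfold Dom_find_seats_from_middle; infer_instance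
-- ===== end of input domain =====

-- B replaces A's two directional early-stopping while-loops by key-sorting the column
-- indices into middle-out order, then one filtering pass and a truncation (alternative
-- decomposition; not claimed faster).

-- ===== PORT A =====
-- seating_map[current_row][col] (both indexings may be negative; none = IndexError somewhere)
def pvGet2 (sm : List (List (Option Int))) (cr col : Int) : Option (Option Int) :=
  (PySem.List.pyGet? sm cr).bind (fun row => PySem.List.pyGet? row col)

-- the first while loop: col goes up from middle while col < seats_per_row and len(seats) < num_tickets
def pvLoopR (sm : List (List (Option Int))) (cr n spr : Int) (col : Int) (seats : List (Int × Int)) : List (Int × Int) :=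
  if _h : col < spr ∧ (seats.length : Int) < n then
    pvLoopR sm cr n spr (col + 1)
      (if pvGet2 sm cr col = some none then seats ++ [(cr, col)] else seats)
  else seats
termination_by (spr - col).toNat
decreasing_by omega

-- the second while loop: col goes down from middle-1 while col >= 0 and len(seats) < num_tickets
def pvLoopL (sm : List (List (Option Int))) (cr n : Int) (col : Int) (seats : List (Int × Int)) : List (Int × Int) :=
  if _h : 0 ≤ col ∧ (seats.length : Int) < n then
    pvLoopL sm cr n (col - 1)
      (if pvGet2 sm cr col = some none then seats ++ [(cr, col)] else seats)
  else seats
termination_by (col + 1).toNat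
decreasing_by omega

def find_seats_from_middle (seating_map : List (List (Option Int))) (current_row : Int) (num_tickets : Int) : List (Int × Int) :=
  let seats_per_row : Int := ((PySem.List.pyGet? seating_map 0).getD []).length
  let middle : Int := PySem.Int.floordiv (seats_per_row - 1) 2
  let seats := pvLoopR seating_map current_row num_tickets seats_per_row middle []
  pvLoopL seating_map current_row num_tickets (middle - 1) seats

-- ===== PORT B =====
-- the key function of Source B: c - middle if c >= middle else seats_per_row + middle - c
def pvSeatKey (spr middle c : Int) : Int :=
  if middle ≤ c then c - middle else spr + middle - c

def find_seats_from_middle_alt (seating_map : List (List (Option Int))) (current_row : Int) (num_tickets : Int) : List (Int × Int) :=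
  match PySem.List.pyGet? seating_map current_row with
  | none => []   -- row = seating_map[current_row] raises IndexError in Python; outside Pre_
  | some row =>
    let seats_per_row : Int := ((PySem.List.pyGet? seating_map 0).getD []).length
    let middle : Int := PySem.Int.floordiv (seats_per_row - 1) 2
    let order : List Int :=
      PySem.List.sorted (PySem.List.pyRange 0 seats_per_row 1) (pvSeatKey seats_per_row middle) false
    let available : List (Int × Int) :=
      (order.filter (fun c => PySem.List.pyGet? row c == some none)).map (fun c => (current_row, c))
    available.take (max num_tickets 0).toNat

-- ===== PRECONDITION & SPEC =====
-- Pre_ requires a non-empty map, current_row a valid (possibly negative) index, and the target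
-- row at least as long as row 0 (on ragged shorter rows whether A returns or raises IndexError
-- is an accident of how far its early-stopping scan gets, and B's full pass raises); it also
-- excludes zero-width row 0 with num_tickets > 0, where A raises IndexError probing column -1
-- on an empty target row, or wraps around to the nonexistent seat (current_row, -1) on a ragged
-- non-empty one, while B returns [].
def Pre_find_seats_from_middle (seating_map : List (List (Option Int))) (current_row : Int) (num_tickets : Int) : Prop :=
  seating_map ≠ [] ∧ PySem.Raise.InRange seating_map.length current_row ∧
  (seating_map.headD []).length ≤ ((PySem.List.pyGet? seating_map current_row).getD []).length ∧
  ((seating_map.headD []).length = 0 → num_tickets ≤ 0)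
instance (seating_map : List (List (Option Int))) (current_row : Int) (num_tickets : Int) : Decidable (Pre_find_seats_from_middle seating_map current_row num_tickets) := by unfold Pre_find_seats_from_middle; infer_instance

def pvWitness_find_seats_from_middle : List (List (Option Int)) × Int × Int := ([[some 1, none]], 0, 1)

def Spec_find_seats_from_middle (seating_map : List (List (Option Int))) (current_row : Int) (num_tickets : Int) (out : List (Int × Int)) : Prop := out = find_seats_from_middle_alt seating_map current_row num_tickets
instance (seating_map : List (List (Option Int))) (current_row : Int) (num_tickets : Int) (out : List (Int × Int)) : Decidable (Spec_find_seats_from_middle seating_map current_row num_tickets out) := by unfold Spec_find_seats_from_middle; infer_instance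

-- ===== CLAIM (what is proved, stated in full; the proofs are below) =====
def Claim_equal_find_seats_from_middle : Prop := ∀ (seating_map : List (List (Option Int))) (current_row : Int) (num_tickets : Int), Dom_find_seats_from_middle seating_map current_row num_tickets → Pre_find_seats_from_middle seating_map current_row num_tickets → Spec_find_seats_from_middle seating_map current_row num_tickets (find_seats_from_middle seating_map current_row num_tickets)

-- ===== LEMMAS AND PROOFS =====

lemma pvGet2_of_row {sm : List (List (Option Int))} {cr : Int} {row : List (Option Int)}
    (hrow : PySem.List.pyGet? sm cr = some row) (c : Int) :
    pvGet2 sm cr c = PySem.List.pyGet? row c := by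
  simp [pvGet2, hrow]

lemma pvLoopR_eq (sm : List (List (Option Int))) (cr n spr : Int) {row : List (Option Int)}
    (hrow : PySem.List.pyGet? sm cr = some row) :
    ∀ (fuel : Nat) (col : Int) (seats : List (Int × Int)), (spr - col).toNat ≤ fuel →
    pvLoopR sm cr n spr col seats =
      seats ++ (((PySem.List.pyRange col spr 1).filter
          (fun c => PySem.List.pyGet? row c == some none)).map
          (fun c => (cr, c))).take ((n - seats.length).toNat) := by
  intro fuel
  induction fuel with
  | zero =>
    intro col seats hf
    have hcol : spr ≤ col := by omega
    rw [pvLoopR, dif_neg (fun h : col < spr ∧ (seats.length : Int) < n => by omega)]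
    rw [PySem.List.pyRange_one_eq_nil hcol]
    simp
  | succ k ih =>
    intro col seats hf
    by_cases hc : col < spr
    · by_cases hn : (seats.length : Int) < n
      · rw [pvLoopR]
        rw [dif_pos ⟨hc, hn⟩]
        rw [PySem.List.pyRange_one_cons hc]
        rw [pvGet2_of_row hrow]
        by_cases hp : PySem.List.pyGet? row col = some none
        · rw [if_pos hp]
          rw [ih (col + 1) (seats ++ [(cr, col)]) (by omega)]
          have hl : ((seats ++ [(cr, col)]).length : Int) = (seats.length : Int) + 1 := by
            simp
          rw [hl]
          have ht : (n - seats.length).toNat = (n - ((seats.length : Int) + 1)).toNat + 1 := by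
            omega
          simp [hp, ht]
        · rw [if_neg hp]
          rw [ih (col + 1) seats (by omega)]
          simp [hp]
      · rw [pvLoopR, dif_neg (fun h : col < spr ∧ (seats.length : Int) < n => hn h.2)]
        have ht : (n - seats.length).toNat = 0 := by omega
        simp [ht]
    · have hcol : spr ≤ col := by omega
      rw [pvLoopR, dif_neg (fun h : col < spr ∧ (seats.length : Int) < n => hc h.1)]
      rw [PySem.List.pyRange_one_eq_nil hcol]
      simp

lemma pvLoopL_eq (sm : List (List (Option Int))) (cr n : Int) {row : List (Option Int)}
    (hrow : PySem.List.pyGet? sm cr = some row) :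
    ∀ (fuel : Nat) (col : Int) (seats : List (Int × Int)), (col + 1).toNat ≤ fuel →
    pvLoopL sm cr n col seats =
      seats ++ (((PySem.List.pyRange col (-1) (-1)).filter
          (fun c => PySem.List.pyGet? row c == some none)).map
          (fun c => (cr, c))).take ((n - seats.length).toNat) := by
  intro fuel
  induction fuel with
  | zero =>
    intro col seats hf
    have hcol : col ≤ -1 := by omega
    rw [pvLoopL, dif_neg (fun h : 0 ≤ col ∧ (seats.length : Int) < n => by omega)]
    rw [PySem.List.pyRange_neg_one_eq_nil hcol]
    simp
  | succ k ih =>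
    intro col seats hf
    by_cases hc : 0 ≤ col
    · by_cases hn : (seats.length : Int) < n
      · rw [pvLoopL]
        rw [dif_pos ⟨hc, hn⟩]
        rw [PySem.List.pyRange_neg_one_cons (by omega : (-1 : Int) < col)]
        rw [pvGet2_of_row hrow]
        by_cases hp : PySem.List.pyGet? row col = some none
        · rw [if_pos hp]
          rw [ih (col - 1) (seats ++ [(cr, col)]) (by omega)]
          have hl : ((seats ++ [(cr, col)]).length : Int) = (seats.length : Int) + 1 := by
            simp
          rw [hl]
          have ht : (n - seats.length).toNat = (n - ((seats.length : Int) + 1)).toNat + 1 := by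
            omega
          simp [hp, ht]
        · rw [if_neg hp]
          rw [ih (col - 1) seats (by omega)]
          simp [hp]
      · rw [pvLoopL, dif_neg (fun h : 0 ≤ col ∧ (seats.length : Int) < n => hn h.2)]
        have ht : (n - seats.length).toNat = 0 := by omega
        simp [ht]
    · have hcol : col ≤ -1 := by omega
      rw [pvLoopL, dif_neg (fun h : 0 ≤ col ∧ (seats.length : Int) < n => hc h.1)]
      rw [PySem.List.pyRange_neg_one_eq_nil hcol]
      simp

-- the key-sorted column order IS right half then reversed left half
lemma pvOrder_eq (spr middle : Int) (h0 : 0 ≤ middle) (h1 : middle < spr) :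
    PySem.List.sorted (PySem.List.pyRange 0 spr 1) (pvSeatKey spr middle) false =
      PySem.List.pyRange middle spr 1 ++ PySem.List.pyRange (middle - 1) (-1) (-1) := by
  apply PySem.List.sorted_eq_of_perm_of_pairwise_lt
  · -- permutation
    rw [PySem.List.pyRange_neg_one_eq_reverse]
    have h2 : ((-1 : Int) + 1) = 0 := by omega
    have h3 : (middle - 1 + 1) = middle := by omega
    rw [h2, h3]
    refine (List.Perm.append_left _ (List.reverse_perm _)).trans ?_
    refine List.perm_append_comm.trans ?_
    rw [← PySem.List.pyRange_one_append 0 middle spr h0 (by omega)]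
  · -- strictly increasing key along the target order
    rw [List.pairwise_append]
    refine ⟨?_, ?_, ?_⟩
    · have hp := PySem.List.pairwise_lt_pyRange_one (a := middle) (b := spr)
      refine List.Pairwise.imp_of_mem ?_ hp
      intro a b ha hb hab
      rw [PySem.List.mem_pyRange_one] at ha hb
      simp only [pvSeatKey, if_pos ha.1, if_pos hb.1]
      omega
    · have hp := PySem.List.pairwise_lt_pyRange_one (a := 0) (b := middle)
      have hp' : (PySem.List.pyRange 0 middle 1).reverse.Pairwise (fun a b => b < a) := by
        rw [List.pairwise_reverse]; exact hp
      rw [PySem.List.pyRange_neg_one_eq_reverse]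
      have h2 : ((-1 : Int) + 1) = 0 := by omega
      have h3 : (middle - 1 + 1) = middle := by omega
      rw [h2, h3]
      refine List.Pairwise.imp_of_mem ?_ hp'
      intro a b ha hb hab
      rw [List.mem_reverse, PySem.List.mem_pyRange_one] at ha hb
      simp only [pvSeatKey, if_neg (by omega : ¬ middle ≤ a), if_neg (by omega : ¬ middle ≤ b)]
      omega
    · intro a ha b hb
      rw [PySem.List.mem_pyRange_one] at ha
      rw [PySem.List.mem_pyRange_neg_one] at hb
      simp only [pvSeatKey, if_pos ha.1, if_neg (by omega : ¬ middle ≤ b)]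
      omega

-- ===== VERDICT (by name: the statement is the Claim_ definition above) =====
theorem find_seats_from_middle_spec : Claim_equal_find_seats_from_middle := by
  intro sm cr n _hdom hpre
  obtain ⟨hne, hin, _hlen, hzero⟩ := hpre
  obtain ⟨row, hrow⟩ : ∃ row, PySem.List.pyGet? sm cr = some row := by
    cases h : PySem.List.pyGet? sm cr with
    | none => exact absurd ((PySem.List.pyGet?_eq_none_iff (xs := sm) (i := cr)).mp h) (by exact fun h' => h' hin)
    | some r => exact ⟨r, rfl⟩
  unfold Spec_find_seats_from_middle find_seats_from_middle find_seats_from_middle_alt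
  rw [hrow]
  dsimp only
  set spr : Int := (((PySem.List.pyGet? sm 0).getD []).length : Int) with hspr
  set middle : Int := PySem.Int.floordiv (spr - 1) 2 with hmid
  have hspr0 : 0 ≤ spr := by positivity
  by_cases hn0 : n ≤ 0
  · -- both sides are []: A's loops exit immediately, B takes 0 elements
    rw [pvLoopR, dif_neg (fun h : middle < spr ∧ (([] : List (Int × Int)).length : Int) < n => by
      have := h.2; simp at this; omega)]
    rw [pvLoopL, dif_neg (fun h : 0 ≤ middle - 1 ∧ (([] : List (Int × Int)).length : Int) < n => by
      have := h.2; simp at this; omega)]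
    have : (max n 0).toNat = 0 := by omega
    rw [this]
    simp
  · -- 0 < n, hence spr ≥ 1 by Pre_, and 0 ≤ middle < spr
    have hhead : (PySem.List.pyGet? sm 0).getD [] = sm.headD [] := by
      cases sm with
      | nil => exact absurd rfl hne
      | cons x xs => simp
    have hspr1 : 1 ≤ spr := by
      rcases Nat.eq_zero_or_pos ((PySem.List.pyGet? sm 0).getD []).length with h | h
      · exfalso; exact hn0 (hzero (by rwa [hhead] at h))
      · omega
    have hmid_bounds : 0 ≤ middle ∧ middle < spr := by
      rw [hmid, PySem.Int.floordiv_eq_ediv_of_pos (by omega : (0:Int) < 2)]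
      constructor
      · exact Int.ediv_nonneg (by omega) (by omega)
      · have := Int.ediv_le_self 2 (by omega : (0:Int) ≤ spr - 1)
        omega
    rw [pvOrder_eq spr middle hmid_bounds.1 hmid_bounds.2]
    rw [pvLoopR_eq sm cr n spr hrow (spr - middle).toNat middle [] (le_refl _)]
    rw [pvLoopL_eq sm cr n hrow middle.toNat (middle - 1) _ (by omega)]
    set p : Int → Bool := fun c => PySem.List.pyGet? row c == some none with hp
    set f : Int → Int × Int := fun c => (cr, c) with hf
    set R : List (Int × Int) := ((PySem.List.pyRange middle spr 1).filter p).map f with hR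
    set L : List (Int × Int) := ((PySem.List.pyRange (middle - 1) (-1) (-1)).filter p).map f with hL
    simp only [List.filter_append, List.map_append]
    rw [← hR, ← hL]
    rw [List.take_append]
    have h0 : (([] : List (Int × Int)).length : Int) = 0 := by simp
    simp only [List.nil_append, h0, sub_zero]
    have hmax : (max n 0).toNat = n.toNat := by omega
    rw [hmax]
    congr 1
    have hlenR : (R.take n.toNat).length = min n.toNat R.length := by
      simp
    rw [hlenR]
    congr 1
    omega
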